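-- pv_equiv track=rewrite | github.com/AlexViaColl/aoc2022 | day06/part1.py | solve
-- ===== SOURCE A (Python) =====
-- def solve(s):
--     chars = []
--     n = 4
--     for i, c in enumerate(s):
--         if len(chars) != n - 1:
--             chars.append(c)
--         else:
--             chars.append(c)
--             if len(set(chars)) == n:
--                 return i + 1
--
--             if len(chars) == n:
--                 chars.pop(0)
-- ===== SOURCE B (Python) =====
-- def solve(s):
--     last = {}
--     start = 0
--     for i, c in enumerate(s):
--         j = last.get(c)
--         if j is not None and j >= start:
--             start = j + 1
--         last[c] = i
--         if i - start + 1 == 4: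
--             return i + 1
--     return None
-- ===== Notes on version B (the rewrite author's own statement) =====
-- stated objective: faster
-- what changed: B replaces A's rolling 4-char buffer with a per-step set construction by the classic last-seen-index sliding window: a dict of each character's most recent index and a left pointer that jumps past the previous occurrence, returning i+1 when the distinct run reaches length 4.
import Mathlib
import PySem

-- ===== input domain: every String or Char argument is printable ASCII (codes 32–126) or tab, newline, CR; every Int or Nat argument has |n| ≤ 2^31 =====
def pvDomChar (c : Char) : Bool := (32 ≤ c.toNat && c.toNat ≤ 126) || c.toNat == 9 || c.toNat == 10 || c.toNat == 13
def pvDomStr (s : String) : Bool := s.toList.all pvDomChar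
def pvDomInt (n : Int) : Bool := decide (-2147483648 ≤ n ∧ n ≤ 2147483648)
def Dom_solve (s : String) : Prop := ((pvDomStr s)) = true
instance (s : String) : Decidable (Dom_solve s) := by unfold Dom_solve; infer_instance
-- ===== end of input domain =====

-- B replaces A's rolling buffer + per-step set test by the last-seen-index sliding window
-- (dict of most recent positions + left pointer); objective: faster by a constant factor (measured).


-- ===== PORT A =====
-- A's loop: append each char to a buffer 'chars'; once it holds 4 chars, test len(set(chars)) == 4,
-- else pop(0).  (A's local 'n = 4' is inlined as the literals 3 and 4.)
def solveLoopA : List Char → Int → List Char → Option Int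
  | [], _, _ => none
  | c :: rest, i, chars =>
    if chars.length ≠ 3 then
      solveLoopA rest (i + 1) (chars ++ [c])
    else
      let chars' := chars ++ [c]
      if (PySem.Set.ofList chars').length = 4 then some (i + 1)
      else solveLoopA rest (i + 1) (if chars'.length = 4 then chars'.drop 1 else chars')

def solve (s : String) : Option Int := solveLoopA s.toList 0 []

-- ===== PORT B =====
-- B's loop: 'last' maps each char to its most recent index; 'start' is the left end of the
-- current all-distinct run; on seeing c at i, jump start past c's previous occurrence if it is
-- inside the run, record last[c] = i, and return i + 1 when the run length i - start + 1 hits 4.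
def solveLoopB : List Char → Int → PySem.Dict Char Int → Int → Option Int
  | [], _, _, _ => none
  | c :: rest, i, last, start =>
    let start' := match last.get? c with
      | some j => if j ≥ start then j + 1 else start
      | none => start
    let last' := last.insert c i
    if i - start' + 1 = 4 then some (i + 1) else solveLoopB rest (i + 1) last' start'

def solve_alt (s : String) : Option Int := solveLoopB s.toList 0 PySem.Dict.empty 0

-- ===== PRECONDITION & SPEC =====
def Spec_solve (s : String) (out : Option Int) : Prop := out = solve_alt s
instance (s : String) (out : Option Int) : Decidable (Spec_solve s out) := by unfold Spec_solve; infer_instance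

-- ===== CLAIM (what is proved, stated in full; the proofs are below) =====
def Claim_equal_solve : Prop := ∀ (s : String), Dom_solve s → Spec_solve s (solve s)

-- ===== LEMMAS AND PROOFS =====

-- Reference scan both loops are reduced to: walk the ending index k over the string and return
-- (k : Int) + 1 at the first k ≥ 3 whose 4-char window (the drop (k-3) of the (k+1)-prefix) is
-- duplicate-free.
def refScan (cs : List Char) : List Char → Nat → Option Int
  | [], _ => none
  | _ :: rest, k =>
    if 3 ≤ k ∧ ((cs.take (k + 1)).drop (k - 3)).Nodup then some ((k : Int) + 1)
    else refScan cs rest (k + 1)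

-- The dict B's loop has built after processing a prefix l.
def buildLast (l : List Char) : PySem.Dict Char Int :=
  l.zipIdx.foldl (fun d p => d.insert p.1 (p.2 : Int)) PySem.Dict.empty

-- The left pointer B's loop has computed after processing a prefix l: the least m such that
-- l.drop m is duplicate-free.
def minStart (l : List Char) : Nat := Nat.find (⟨l.length, by simp⟩ : ∃ m, (l.drop m).Nodup)

lemma buildLast_snoc (l : List Char) (c : Char) :
    buildLast (l ++ [c]) = (buildLast l).insert c (l.length : Int) := by
  simp [buildLast, List.zipIdx_append, List.foldl_append]

-- get? of buildLast is the last occurrence: it bounds membership in every suffix.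
lemma buildLast_get?_none (l : List Char) (x : Char) :
    (buildLast l).get? x = none → x ∉ l := by
  induction l using List.reverseRecOn with
  | nil => simp
  | append_singleton l c ih =>
    rw [buildLast_snoc]
    by_cases hx : x = c
    · subst hx; simp [PySem.Dict.get?_insert_self]
    · rw [PySem.Dict.get?_insert_of_ne _ _ hx]
      intro h; simp [hx, ih h]

lemma buildLast_get?_some (l : List Char) (x : Char) (j : Int)
    (h : (buildLast l).get? x = some j) :
    ∃ n : Nat, j = (n : Int) ∧ n < l.length ∧ ∀ m : Nat, (x ∈ l.drop m ↔ m ≤ n) := by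
  induction l using List.reverseRecOn generalizing j with
  | nil => simp [buildLast, PySem.Dict.get?_empty] at h
  | append_singleton l c ih =>
    rw [buildLast_snoc] at h
    by_cases hx : x = c
    · subst hx
      rw [PySem.Dict.get?_insert_self] at h
      refine ⟨l.length, by simpa using h.symm, by simp, fun m => ?_⟩
      constructor
      · intro hm
        by_contra hgt
        rw [List.drop_eq_nil_of_le (by simp; omega)] at hm
        simp at hm
      · intro hm
        rw [List.drop_append_of_le_length hm]
        simp
    · rw [PySem.Dict.get?_insert_of_ne _ _ hx] at h
      obtain ⟨n, rfl, hn, hm⟩ := ih _ h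
      refine ⟨n, rfl, by simp; omega, fun m => ?_⟩
      by_cases hml : m ≤ l.length
      · rw [List.drop_append_of_le_length hml]
        simp [hx, hm m]
      · rw [List.drop_eq_nil_of_le (by simp; omega)]
        simp
        omega

lemma minStart_le (l : List Char) (m : Nat) (h : (l.drop m).Nodup) : minStart l ≤ m := by
  unfold minStart; exact Nat.find_min' _ h

lemma minStart_nodup (l : List Char) : (l.drop (minStart l)).Nodup :=
  Nat.find_spec (⟨l.length, by simp⟩ : ∃ m, (l.drop m).Nodup)

lemma nodup_drop_mono (l : List Char) {m m' : Nat} (hle : m ≤ m')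
    (h : (l.drop m).Nodup) : (l.drop m').Nodup := by
  have : l.drop m' = (l.drop m).drop (m' - m) := by
    rw [List.drop_drop]; congr 1; omega
  rw [this]
  exact h.sublist (List.drop_sublist _ _)

lemma minStart_iff (l : List Char) (m : Nat) : (l.drop m).Nodup ↔ minStart l ≤ m :=
  ⟨minStart_le l m, fun h => nodup_drop_mono l h (minStart_nodup l)⟩

-- one step of the window: the (m)-suffix of l ++ [c] is duplicate-free iff the (m)-suffix of l is
-- and c does not occur in it.
lemma nodup_drop_snoc (l : List Char) (c : Char) (m : Nat) :
    ((l ++ [c]).drop m).Nodup ↔ (l.drop m).Nodup ∧ c ∉ l.drop m := by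
  by_cases hm : m ≤ l.length
  · rw [List.drop_append_of_le_length hm]
    simp [List.nodup_append]
    intro _
    constructor
    · intro h hc; exact h c hc rfl
    · intro h a ha rfl; exact h ha
  · rw [List.drop_eq_nil_of_le (by simp; omega), List.drop_eq_nil_of_le (by omega)]
    simp

lemma minStart_snoc_iff (l : List Char) (c : Char) (m : Nat) :
    minStart (l ++ [c]) ≤ m ↔ minStart l ≤ m ∧ c ∉ l.drop m := by
  rw [← minStart_iff, nodup_drop_snoc, minStart_iff]

lemma minStart_snoc_mono (l : List Char) (c : Char) : minStart l ≤ minStart (l ++ [c]) :=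
  ((minStart_snoc_iff l c _).mp le_rfl).1

-- B's pointer update computes minStart of the extended prefix.
lemma minStart_snoc_none (l : List Char) (c : Char) (h : (buildLast l).get? c = none) :
    minStart (l ++ [c]) = minStart l := by
  have hnm : c ∉ l := buildLast_get?_none l c h
  refine eq_of_forall_ge_iff fun m => ?_
  rw [minStart_snoc_iff]
  have : c ∉ l.drop m := fun hc => hnm (List.mem_of_mem_drop hc)
  tauto

lemma minStart_snoc_some (l : List Char) (c : Char) (n : Nat)
    (h : (buildLast l).get? c = some (n : Int)) :
    minStart (l ++ [c]) = if minStart l ≤ n then n + 1 else minStart l := by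
  obtain ⟨n', hn', _, hm⟩ := buildLast_get?_some l c _ h
  have hnn : n' = n := by omega
  subst hnn
  refine eq_of_forall_ge_iff fun m => ?_
  rw [minStart_snoc_iff]
  split_ifs with hms
  · constructor
    · rintro ⟨h1, h2⟩
      by_contra hlt
      exact h2 ((hm m).mpr (by omega))
    · intro h1
      exact ⟨by omega, fun hc => absurd ((hm m).mp hc) (by omega)⟩
  · constructor
    · rintro ⟨h1, _⟩; exact h1
    · intro h1
      refine ⟨h1, fun hc => ?_⟩
      have := (hm m).mp hc
      omega

-- B's loop, started with the state built from the processed prefix, equals the reference scan.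
lemma loopB_eq_ref (cs : List Char) : ∀ (rest : List Char) (k : Nat),
    cs.drop k = rest → k - minStart (cs.take k) ≤ 3 →
    solveLoopB rest (k : Int) (buildLast (cs.take k)) ((minStart (cs.take k) : Nat) : Int) =
      refScan cs rest k := by
  intro rest
  induction rest with
  | nil => intro k _ _; simp [solveLoopB, refScan]
  | cons c rest ih =>
    intro k hdrop hbound
    have hk : k < cs.length := by
      have := congrArg List.length hdrop; simp at this; omega
    have hget : cs[k]? = some c := by
      have h : (cs.drop k)[0]? = cs[k + 0]? := List.getElem?_drop
      rw [hdrop] at h; simpa using h.symm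
    have htake : cs.take (k + 1) = cs.take k ++ [c] := by
      rw [List.take_add_one]; simp [hget]
    have hlen : (cs.take k).length = k := by simp [List.length_take]; omega
    have hdrop' : cs.drop (k + 1) = rest := by
      have h := congrArg List.tail hdrop
      rw [List.tail_drop] at h; simpa using h
    have hmono : minStart (cs.take k) ≤ minStart (cs.take (k + 1)) := by
      rw [htake]; exact minStart_snoc_mono _ _
    have hmsle : minStart (cs.take (k + 1)) ≤ k + 1 := by
      have := minStart_le (cs.take (k + 1)) (k + 1)
        (by rw [List.drop_eq_nil_of_le (by simp [List.length_take])]; exact List.nodup_nil)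
      omega
    -- the common step, once the computed pointer is known to be minStart of the longer prefix
    have key : ∀ startv : Int, startv = ((minStart (cs.take (k + 1)) : Nat) : Int) →
        (if (k : Int) - startv + 1 = 4 then some ((k : Int) + 1)
         else solveLoopB rest ((k : Int) + 1)
                ((buildLast (cs.take k)).insert c (k : Int)) startv) =
          refScan cs (c :: rest) k := by
      intro startv hsv
      subst hsv
      have hins : (buildLast (cs.take k)).insert c (k : Int) = buildLast (cs.take (k + 1)) := by
        rw [htake, buildLast_snoc, hlen]
      have htrig : ((k : Int) - ((minStart (cs.take (k + 1)) : Nat) : Int) + 1 = 4) ↔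
          (3 ≤ k ∧ minStart (cs.take (k + 1)) ≤ k - 3) := by omega
      simp only [refScan]
      by_cases htr : 3 ≤ k ∧ ((cs.take (k + 1)).drop (k - 3)).Nodup
      · rw [if_pos htr,
            if_pos (htrig.mpr ⟨htr.1, (minStart_iff _ _).mp htr.2⟩)]
      · have hnt : ¬ ((k : Int) - ((minStart (cs.take (k + 1)) : Nat) : Int) + 1 = 4) := by
          intro hh
          exact htr ⟨(htrig.mp hh).1, (minStart_iff _ _).mpr (htrig.mp hh).2⟩
        rw [if_neg hnt, if_neg htr, hins]
        have hb' : (k + 1) - minStart (cs.take (k + 1)) ≤ 3 := by omega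
        have := ih (k + 1) hdrop' hb'
        push_cast at this ⊢
        exact this
    cases hg : (buildLast (cs.take k)).get? c with
    | none =>
      have hms : minStart (cs.take (k + 1)) = minStart (cs.take k) := by
        rw [htake]; exact minStart_snoc_none _ _ hg
      simp only [solveLoopB, hg]
      exact key _ (by rw [hms])
    | some j =>
      obtain ⟨n, rfl, hn, hm⟩ := buildLast_get?_some _ _ _ hg
      have hms : minStart (cs.take (k + 1)) =
          if minStart (cs.take k) ≤ n then n + 1 else minStart (cs.take k) := by
        rw [htake]; exact minStart_snoc_some _ _ _ hg
      simp only [solveLoopB, hg]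
      apply key
      rw [hms]
      by_cases hc : minStart (cs.take k) ≤ n
      · rw [if_pos hc, if_pos (by omega)]
        omega
      · rw [if_neg hc, if_neg (by omega)]

-- len(set([a,b,c,d])) == 4 is exactly pairwise distinctness.
lemma set4_len (a b c d : Char) :
    (PySem.Set.ofList [a, b, c, d]).length = 4 ↔
      (a ≠ b ∧ a ≠ c ∧ a ≠ d ∧ b ≠ c ∧ b ≠ d ∧ c ≠ d) := by
  by_cases hab : a = b <;> by_cases hac : a = c <;> by_cases had : a = d <;>
    by_cases hbc : b = c <;> by_cases hbd : b = d <;> by_cases hcd : c = d <;>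
    subst_eqs <;>
    simp [PySem.Set.ofList, PySem.Set.add, PySem.Set.contains, *] <;>
    split_ifs <;> simp_all <;> simp_all [eq_comm]

-- A's loop, with its buffer holding the 3 chars before position k, equals the reference scan.
lemma loopA_eq_ref (cs : List Char) : ∀ (rest : List Char) (k : Nat) (a b c : Char),
    3 ≤ k → cs.drop (k - 3) = a :: b :: c :: rest →
    solveLoopA rest (k : Int) [a, b, c] = refScan cs rest k := by
  intro rest
  induction rest with
  | nil => intro k a b c _ _; simp [solveLoopA, refScan]
  | cons d rest' ih =>
    intro k a b c hk3 hdrop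
    have hwin : (cs.take (k + 1)).drop (k - 3) = [a, b, c, d] := by
      rw [List.drop_take, hdrop, show k + 1 - (k - 3) = 4 by omega]
      rfl
    have hdrop' : cs.drop (k + 1 - 3) = b :: c :: d :: rest' := by
      have h := congrArg List.tail hdrop
      rw [List.tail_drop, show k - 3 + 1 = k + 1 - 3 by omega] at h
      simpa using h
    simp only [solveLoopA, refScan, hwin]
    norm_num
    by_cases hset : (PySem.Set.ofList [a, b, c, d]).length = 4
    · rw [if_pos hset, if_pos]
      refine ⟨hk3, ?_⟩
      have := (set4_len a b c d).mp hset
      tauto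
    · rw [if_neg hset, if_neg]
      · have := ih (k + 1) b c d (by omega) hdrop'
        push_cast at this ⊢
        simpa using this
      · rintro ⟨-, hnd⟩
        apply hset
        rw [set4_len]
        tauto

theorem solve_eq_alt (cs : List Char) :
    solveLoopA cs 0 [] = solveLoopB cs 0 PySem.Dict.empty 0 := by
  have hms0 : minStart (List.take 0 cs) = 0 :=
    Nat.le_zero.mp (minStart_le _ 0 (by simp))
  have hB : solveLoopB cs 0 PySem.Dict.empty 0 = refScan cs cs 0 := by
    have h := loopB_eq_ref cs cs 0 rfl (by omega)
    rw [hms0] at h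
    simpa [buildLast] using h
  rw [hB]
  rcases cs with _ | ⟨a, _ | ⟨b, _ | ⟨c, rest⟩⟩⟩
  · simp [solveLoopA, refScan]
  · simp [solveLoopA, refScan]
  · simp [solveLoopA, refScan]
  · have h1 : solveLoopA (a :: b :: c :: rest) 0 [] = solveLoopA rest 3 [a, b, c] := by
      simp [solveLoopA]
    have h2 : refScan (a :: b :: c :: rest) (a :: b :: c :: rest) 0 =
        refScan (a :: b :: c :: rest) rest 3 := by
      simp [refScan]
    rw [h1, h2]
    have := loopA_eq_ref (a :: b :: c :: rest) rest 3 a b c (by omega) (by simp)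
    simpa using this

-- ===== VERDICT (by name: the statement is the Claim_ definition above) =====
theorem solve_spec : Claim_equal_solve := by
  intro s _
  unfold Spec_solve solve solve_alt
  exact solve_eq_alt s.toList
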